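-- pv_equiv track=rewrite | github.com/vani-priya-g/max_profit | max_profit.py | max_profit_all
-- ===== SOURCE A (Python) =====
-- def max_profit_all(n):
--     buildings = {"T": (5,1500), "P": (4,1000), "C": (10,2000)}
--     best_profit = 0
--     best_list = []
--
--     for T in range(n // 5 + 1):
--         for P in range(n // 4 + 1):
--             for C in range(n // 10 + 1):
--                 total_time = T*5 + P*4 + C*10
--                 if total_time > n:
--                     continue
--
--                 profit = 0
--                 current_time = 0
--                 for _ in range(T):
--                     current_time += 5
--                     profit += (n - current_time) * 1500
--                 for _ in range(P):
--                     current_time += 4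
--                     profit += (n - current_time) * 1000
--                 for _ in range(C):
--                     current_time += 10
--                     profit += (n - current_time) * 2000
--
--                 if profit > best_profit:
--                     best_profit = profit
--                     best_list = [(T, P, C)]
--                 elif profit == best_profit:
--                     best_list.append((T, P, C))
--
--     return best_profit, best_list
-- ===== SOURCE B (Python) =====
-- def max_profit_all(n):
--     def profit(T, P, C):
--         return (1500 * (n * T - 5 * T * (T + 1) // 2)
--                 + 1000 * ((n - 5 * T) * P - 2 * P * (P + 1))
--                 + 2000 * ((n - 5 * T - 4 * P) * C - 5 * C * (C + 1)))
--
--     combos = [(T, P, C)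
--               for T in range(n // 5 + 1)
--               for P in range(n // 4 + 1)
--               for C in range(n // 10 + 1)
--               if 5 * T + 4 * P + 10 * C <= n]
--     best = max((profit(T, P, C) for (T, P, C) in combos), default=0)
--     return best, [c for c in combos if profit(*c) == best]
-- ===== Notes on version B (the rewrite author's own statement) =====
-- stated objective: faster
-- what changed: B replaces A's inner per-building accumulation loops by a closed-form arithmetic-series profit formula and replaces A's running best/tie accumulator by build-candidates-once, take max, filter ties.
import Mathlib
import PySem

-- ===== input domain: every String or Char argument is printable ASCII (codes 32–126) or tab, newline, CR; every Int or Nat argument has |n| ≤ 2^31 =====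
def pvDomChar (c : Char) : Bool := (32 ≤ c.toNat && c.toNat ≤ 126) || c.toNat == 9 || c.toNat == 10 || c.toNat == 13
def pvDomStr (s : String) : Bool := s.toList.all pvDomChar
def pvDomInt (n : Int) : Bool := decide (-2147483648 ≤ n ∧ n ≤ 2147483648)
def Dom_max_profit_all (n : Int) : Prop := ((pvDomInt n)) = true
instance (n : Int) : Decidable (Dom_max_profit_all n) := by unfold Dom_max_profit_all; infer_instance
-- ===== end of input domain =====

-- B replaces A's O(n) inner accumulation loops by a closed-form arithmetic-series profit
-- formula and A's running best/tie accumulator by build-candidates-once / max / filter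
-- (objective: faster, O(n^3) instead of O(n^4)).

-- ===== PORT A =====
def max_profit_all (n : Int) : Int × (List (Int × Int × Int)) :=
  (PySem.List.pyRange 0 (PySem.Int.floordiv n 5 + 1) 1).foldl (fun acc T =>
    (PySem.List.pyRange 0 (PySem.Int.floordiv n 4 + 1) 1).foldl (fun acc P =>
      (PySem.List.pyRange 0 (PySem.Int.floordiv n 10 + 1) 1).foldl (fun acc C =>
        let total_time := T * 5 + P * 4 + C * 10
        if total_time > n then acc
        else
          let s1 := (PySem.List.pyRange 0 T 1).foldl
            (fun (s : Int × Int) _ => (s.1 + 5, s.2 + (n - (s.1 + 5)) * 1500)) (0, 0)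
          let s2 := (PySem.List.pyRange 0 P 1).foldl
            (fun (s : Int × Int) _ => (s.1 + 4, s.2 + (n - (s.1 + 4)) * 1000)) s1
          let s3 := (PySem.List.pyRange 0 C 1).foldl
            (fun (s : Int × Int) _ => (s.1 + 10, s.2 + (n - (s.1 + 10)) * 2000)) s2
          let profit := s3.2
          if profit > acc.1 then (profit, [(T, P, C)])
          else if profit = acc.1 then (acc.1, acc.2 ++ [(T, P, C)])
          else acc) acc) acc) (0, [])

-- ===== PORT B =====
def pvProfit (n T P C : Int) : Int :=
  1500 * (n * T - PySem.Int.floordiv (5 * T * (T + 1)) 2)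
  + 1000 * ((n - 5 * T) * P - 2 * P * (P + 1))
  + 2000 * ((n - 5 * T - 4 * P) * C - 5 * C * (C + 1))

def pvCombos (n : Int) : List (Int × Int × Int) :=
  (PySem.List.pyRange 0 (PySem.Int.floordiv n 5 + 1) 1).flatMap (fun T =>
    (PySem.List.pyRange 0 (PySem.Int.floordiv n 4 + 1) 1).flatMap (fun P =>
      ((PySem.List.pyRange 0 (PySem.Int.floordiv n 10 + 1) 1).filter
          (fun C => decide (5 * T + 4 * P + 10 * C ≤ n))).map (fun C => (T, P, C))))

def max_profit_all_alt (n : Int) : Int × (List (Int × Int × Int)) :=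
  let combos := pvCombos n
  let best :=
    match combos.map (fun c => pvProfit n c.1 c.2.1 c.2.2) with
    | [] => 0
    | x :: xs => xs.foldl max x
  (best, combos.filter (fun c => decide (pvProfit n c.1 c.2.1 c.2.2 = best)))

-- ===== PRECONDITION & SPEC =====
def Spec_max_profit_all (n : Int) (out : Int × (List (Int × Int × Int))) : Prop := out = max_profit_all_alt n
instance (n : Int) (out : Int × (List (Int × Int × Int))) : Decidable (Spec_max_profit_all n out) := by unfold Spec_max_profit_all; infer_instance

-- ===== CLAIM (what is proved, stated in full; the proofs are below) =====
def Claim_equal_max_profit_all : Prop := ∀ (n : Int), Dom_max_profit_all n → Spec_max_profit_all n (max_profit_all n)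

-- ===== LEMMAS AND PROOFS =====

-- triangular number (m*(m+1)/2), as an Int
def pvTri (m : Nat) : Int := ((m * (m + 1) / 2 : Nat) : Int)

theorem pvTri_two_mul (m : Nat) : 2 * pvTri m = (m : Int) * (m + 1) := by
  have h : 2 * (m * (m + 1) / 2) = m * (m + 1) :=
    Nat.mul_div_cancel' (Nat.even_mul_succ_self m).two_dvd
  unfold pvTri
  exact_mod_cast congrArg (fun k : Nat => (k : Int)) h

theorem pvTri_succ (m : Nat) : pvTri (m + 1) = pvTri m + (m : Int) + 1 := by
  have h1 := pvTri_two_mul m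
  have h2 := pvTri_two_mul (m + 1)
  push_cast at h2
  linarith

-- A's accumulation loop in closed form (d = build time, mul = per-unit profit).
theorem pvLoop_closed (n d mul : Int) (L : List Int) :
    ∀ (c p : Int),
      L.foldl (fun (s : Int × Int) _ => (s.1 + d, s.2 + (n - (s.1 + d)) * mul)) (c, p)
      = (c + d * L.length,
         p + mul * ((n - c) * L.length) - mul * d * pvTri L.length) := by
  induction L with
  | nil => intro c p; simp [pvTri]
  | cons x xs ih =>
    intro c p
    simp only [List.foldl_cons, List.length_cons]
    rw [ih]
    have ht := pvTri_succ xs.length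
    rw [Prod.mk.injEq]
    refine ⟨by push_cast; ring, by rw [ht]; push_cast; ring⟩

theorem pvFloordiv_tri (m : Nat) :
    PySem.Int.floordiv (5 * (m : Int) * ((m : Int) + 1)) 2 = 5 * pvTri m := by
  have h := pvTri_two_mul m
  rw [PySem.Int.floordiv_eq_iff_of_pos (by norm_num)]
  constructor <;> nlinarith

-- the profit A computes by its three loops equals pvProfit, for nonnegative T P C
theorem pvProfA_eq (n T P C : Int) (hT : 0 ≤ T) (hP : 0 ≤ P) (hC : 0 ≤ C) :
    (let s1 := (PySem.List.pyRange 0 T 1).foldl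
        (fun (s : Int × Int) _ => (s.1 + 5, s.2 + (n - (s.1 + 5)) * 1500)) (0, 0)
     let s2 := (PySem.List.pyRange 0 P 1).foldl
        (fun (s : Int × Int) _ => (s.1 + 4, s.2 + (n - (s.1 + 4)) * 1000)) s1
     let s3 := (PySem.List.pyRange 0 C 1).foldl
        (fun (s : Int × Int) _ => (s.1 + 10, s.2 + (n - (s.1 + 10)) * 2000)) s2
     s3.2)
    = pvProfit n T P C := by
  obtain ⟨mT, rfl⟩ := Int.eq_ofNat_of_zero_le hT
  obtain ⟨mP, rfl⟩ := Int.eq_ofNat_of_zero_le hP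
  obtain ⟨mC, rfl⟩ := Int.eq_ofNat_of_zero_le hC
  have lT : (PySem.List.pyRange 0 (mT : Int) 1).length = mT := by
    rw [PySem.List.length_pyRange_one]; simp
  have lP : (PySem.List.pyRange 0 (mP : Int) 1).length = mP := by
    rw [PySem.List.length_pyRange_one]; simp
  have lC : (PySem.List.pyRange 0 (mC : Int) 1).length = mC := by
    rw [PySem.List.length_pyRange_one]; simp
  simp only [pvLoop_closed, lT, lP, lC, pvProfit, pvFloordiv_tri]
  have h1 := pvTri_two_mul mT
  have h2 := pvTri_two_mul mP
  have h3 := pvTri_two_mul mC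
  nlinarith [h1, h2, h3]

-- the best/tie-list accumulator in closed form: final best is a running max,
-- final list is the ties of the final best (prefixed by l if the best never moved)
theorem pvBestFold {γ : Type} (φ : γ → Int) (cs : List γ) :
    ∀ (m : Int) (l : List γ),
      cs.foldl (fun acc c =>
          if φ c > acc.1 then (φ c, [c])
          else if φ c = acc.1 then (acc.1, acc.2 ++ [c])
          else acc) (m, l)
      = ((cs.foldl (fun a c => max a (φ c)) m),
         (if cs.foldl (fun a c => max a (φ c)) m = m then l else [])
           ++ cs.filter (fun c => decide (φ c = cs.foldl (fun a c => max a (φ c)) m))) := by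
  induction cs with
  | nil => intro m l; simp
  | cons c cs ih =>
    intro m l
    simp only [List.foldl_cons, List.filter_cons]
    by_cases h1 : φ c > m
    · rw [if_pos h1, ih]
      have hmax : max m (φ c) = φ c := by omega
      simp only [hmax]
      have hge : φ c ≤ cs.foldl (fun a c => max a (φ c)) (φ c) :=
        (PySem.List.le_foldl_max_int cs φ (φ c)).1
      have hne : cs.foldl (fun a c => max a (φ c)) (φ c) ≠ m := by omega
      rw [if_neg hne]
      by_cases h2 : φ c = cs.foldl (fun a c => max a (φ c)) (φ c)
      · rw [if_pos h2.symm, if_pos (decide_eq_true h2)]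
        simp
      · rw [if_neg (fun h => h2 h.symm),
            if_neg (by simp only [decide_eq_true_eq]; exact h2)]
    · rw [if_neg h1]
      by_cases h2 : φ c = m
      · rw [if_pos h2, ih]
        have hmax : max m (φ c) = m := by omega
        simp only [hmax]
        by_cases h3 : cs.foldl (fun a c => max a (φ c)) m = m
        · rw [if_pos h3, if_pos h3, if_pos (decide_eq_true (h2.trans h3.symm))]
          simp [List.append_assoc]
        · rw [if_neg h3, if_neg h3,
              if_neg (by simp only [decide_eq_true_eq]; intro h; exact h3 (h.symm.trans h2))]
      · rw [if_neg h2, ih]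
        have hmax : max m (φ c) = m := by omega
        simp only [hmax]
        have hge : m ≤ cs.foldl (fun a c => max a (φ c)) m :=
          (PySem.List.le_foldl_max_int cs φ m).1
        rw [if_neg (show ¬ (decide (φ c = List.foldl (fun a c => max a (φ c)) m cs) = true) by
          simp only [decide_eq_true_eq]; omega)]

-- skip-style loop = fold over the filtered list
theorem pvFoldlSkip {α β : Type} (p : β → Prop) [DecidablePred p] (f : α → β → α) :
    ∀ (l : List β) (init : α),
      l.foldl (fun acc x => if p x then acc else f acc x) init
      = (l.filter (fun x => !(decide (p x)))).foldl f init := by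
  intro l
  induction l with
  | nil => intro init; simp
  | cons x xs ih =>
    intro init
    simp only [List.foldl_cons, List.filter_cons]
    by_cases h : p x <;> simp [h, ih]

-- pushing a filter out of a flatMap
theorem pvFlatMapFilter {α β : Type} (g : α → List β) (q : β → Bool) :
    ∀ (l : List α),
      l.flatMap (fun x => (g x).filter q) = (l.flatMap g).filter q := by
  intro l
  induction l with
  | nil => simp
  | cons x xs ih => simp [List.flatMap_cons, List.filter_append, ih]

-- the unfiltered candidate stream A iterates over
def pvTriples (n : Int) : List (Int × Int × Int) :=
  (PySem.List.pyRange 0 (PySem.Int.floordiv n 5 + 1) 1).flatMap (fun T =>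
    (PySem.List.pyRange 0 (PySem.Int.floordiv n 4 + 1) 1).flatMap (fun P =>
      (PySem.List.pyRange 0 (PySem.Int.floordiv n 10 + 1) 1).map (fun C => (T, P, C))))

theorem pvMem_triples (n : Int) (c : Int × Int × Int) (h : c ∈ pvTriples n) :
    0 ≤ c.1 ∧ 0 ≤ c.2.1 ∧ 0 ≤ c.2.2 := by
  unfold pvTriples at h
  simp only [List.mem_flatMap, List.mem_map] at h
  obtain ⟨T, hT, P, hP, C, hC, rfl⟩ := h
  rw [PySem.List.mem_pyRange_one] at hT hP hC
  exact ⟨hT.1, hP.1, hC.1⟩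

-- pvCombos is the feasible sublist of the stream, with A's guard
theorem pvCombos_eq_filter (n : Int) :
    pvCombos n = (pvTriples n).filter
      (fun c => !(decide (c.1 * 5 + c.2.1 * 4 + c.2.2 * 10 > n))) := by
  unfold pvCombos pvTriples
  rw [← pvFlatMapFilter]
  apply List.flatMap_congr
  intro T _
  rw [← pvFlatMapFilter]
  apply List.flatMap_congr
  intro P _
  rw [List.filter_map]
  congr 1
  apply List.filter_congr
  intro C _
  simp only [Function.comp]
  rcases le_or_gt (5 * T + 4 * P + 10 * C) n with h | h
  · rw [decide_eq_true h, decide_eq_false (by omega : ¬ (T * 5 + P * 4 + C * 10 > n))]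
    rfl
  · rw [decide_eq_false (by omega : ¬ (5 * T + 4 * P + 10 * C ≤ n)),
        decide_eq_true (by omega : T * 5 + P * 4 + C * 10 > n)]
    rfl

theorem pvProfit_zero (n : Int) : pvProfit n 0 0 0 = 0 := by
  unfold pvProfit
  have : PySem.Int.floordiv (5 * (0:Int) * ((0:Int) + 1)) 2 = 0 := by
    rw [PySem.Int.floordiv_eq_iff_of_pos (by norm_num)]; norm_num
  rw [this]; ring

theorem pvCombos_head (n : Int) (hn : 0 ≤ n) :
    ∃ rest, pvCombos n = (0, 0, 0) :: rest := by
  have h5 : (0 : Int) < PySem.Int.floordiv n 5 + 1 := by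
    have := (PySem.Int.le_floordiv_iff_mul_le (a := n) (b := 5) (q := 0) (by norm_num)).2
      (by omega)
    omega
  have h4 : (0 : Int) < PySem.Int.floordiv n 4 + 1 := by
    have := (PySem.Int.le_floordiv_iff_mul_le (a := n) (b := 4) (q := 0) (by norm_num)).2
      (by omega)
    omega
  have h10 : (0 : Int) < PySem.Int.floordiv n 10 + 1 := by
    have := (PySem.Int.le_floordiv_iff_mul_le (a := n) (b := 10) (q := 0) (by norm_num)).2
      (by omega)
    omega
  unfold pvCombos
  rw [PySem.List.pyRange_one_cons h5, PySem.List.pyRange_one_cons h4,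
      PySem.List.pyRange_one_cons h10]
  simp only [List.flatMap_cons, List.filter_cons]
  have : decide (5 * (0:Int) + 4 * 0 + 10 * 0 ≤ n) = true := by
    simp; omega
  rw [this]
  exact ⟨_, rfl⟩

theorem pvCombos_empty (n : Int) (hn : n < 0) : pvCombos n = [] := by
  have h5 : PySem.Int.floordiv n 5 + 1 ≤ 0 := by
    have := (PySem.Int.floordiv_lt_iff_lt_mul (a := n) (b := 5) (q := 0) (by norm_num)).2
      (by omega)
    omega
  unfold pvCombos
  rw [PySem.List.pyRange_one_eq_nil
    (a := 0) (b := PySem.Int.floordiv n 5 + 1) (by omega)]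
  simp

-- A's whole computation, re-expressed as one fold over the candidate stream
theorem pvA_eq_fold (n : Int) :
    max_profit_all n
    = (pvCombos n).foldl (fun acc c =>
        if pvProfit n c.1 c.2.1 c.2.2 > acc.1 then (pvProfit n c.1 c.2.1 c.2.2, [c])
        else if pvProfit n c.1 c.2.1 c.2.2 = acc.1 then (acc.1, acc.2 ++ [c])
        else acc) (0, []) := by
  unfold max_profit_all
  have h1 : ∀ (init : Int × List (Int × Int × Int)),
      (PySem.List.pyRange 0 (PySem.Int.floordiv n 5 + 1) 1).foldl (fun acc T =>
        (PySem.List.pyRange 0 (PySem.Int.floordiv n 4 + 1) 1).foldl (fun acc P =>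
          (PySem.List.pyRange 0 (PySem.Int.floordiv n 10 + 1) 1).foldl (fun acc C =>
            let total_time := T * 5 + P * 4 + C * 10
            if total_time > n then acc
            else
              let s1 := (PySem.List.pyRange 0 T 1).foldl
                (fun (s : Int × Int) _ => (s.1 + 5, s.2 + (n - (s.1 + 5)) * 1500)) (0, 0)
              let s2 := (PySem.List.pyRange 0 P 1).foldl
                (fun (s : Int × Int) _ => (s.1 + 4, s.2 + (n - (s.1 + 4)) * 1000)) s1
              let s3 := (PySem.List.pyRange 0 C 1).foldl
                (fun (s : Int × Int) _ => (s.1 + 10, s.2 + (n - (s.1 + 10)) * 2000)) s2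
              let profit := s3.2
              if profit > acc.1 then (profit, [(T, P, C)])
              else if profit = acc.1 then (acc.1, acc.2 ++ [(T, P, C)])
              else acc) acc) acc) init
      = (pvTriples n).foldl (fun acc c =>
          if c.1 * 5 + c.2.1 * 4 + c.2.2 * 10 > n then acc
          else
            let s1 := (PySem.List.pyRange 0 c.1 1).foldl
              (fun (s : Int × Int) _ => (s.1 + 5, s.2 + (n - (s.1 + 5)) * 1500)) (0, 0)
            let s2 := (PySem.List.pyRange 0 c.2.1 1).foldl
              (fun (s : Int × Int) _ => (s.1 + 4, s.2 + (n - (s.1 + 4)) * 1000)) s1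
            let s3 := (PySem.List.pyRange 0 c.2.2 1).foldl
              (fun (s : Int × Int) _ => (s.1 + 10, s.2 + (n - (s.1 + 10)) * 2000)) s2
            let profit := s3.2
            if profit > acc.1 then (profit, [c])
            else if profit = acc.1 then (acc.1, acc.2 ++ [c])
            else acc) init := by
    intro init
    unfold pvTriples
    rw [List.foldl_flatMap]
    apply PySem.List.foldl_congr_mem
    intro acc T _
    rw [List.foldl_flatMap]
    apply PySem.List.foldl_congr_mem
    intro acc P _
    rw [List.foldl_map]
  rw [h1]
  rw [pvFoldlSkip (fun c : Int × Int × Int => c.1 * 5 + c.2.1 * 4 + c.2.2 * 10 > n)]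
  rw [← pvCombos_eq_filter]
  apply PySem.List.foldl_congr_mem
  intro acc c hc
  have hmem : c ∈ pvTriples n := by
    rw [pvCombos_eq_filter] at hc
    exact List.mem_of_mem_filter hc
  obtain ⟨hT, hP, hC⟩ := pvMem_triples n c hmem
  have := pvProfA_eq n c.1 c.2.1 c.2.2 hT hP hC
  simp only at this ⊢
  rw [this]

-- ===== VERDICT (by name: the statement is the Claim_ definition above) =====
theorem max_profit_all_spec : Claim_equal_max_profit_all := by
  intro n _
  unfold Spec_max_profit_all
  rw [pvA_eq_fold]
  rw [pvBestFold (fun c : Int × Int × Int => pvProfit n c.1 c.2.1 c.2.2) (pvCombos n)]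
  unfold max_profit_all_alt
  rcases lt_or_ge n 0 with hn | hn
  · rw [pvCombos_empty n hn]
    simp
  · obtain ⟨rest, hcomb⟩ := pvCombos_head n hn
    rw [hcomb]
    simp only [List.map_cons, List.foldl_cons, List.foldl_map, pvProfit_zero, max_self,
      ite_self, List.nil_append]
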